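-- pv_equiv track=rewrite | github.com/bboats/trabFormais | bin/oopLib.py | formatLanguage
-- ===== SOURCE A (Python) =====
-- def formatLanguage(lang):
-- 	#turns language into list so it can be mutable
-- 	language = list(lang)
--
-- 	aux = 0 #aux value so we know if we have a normal comma or double comma
--
-- 	for index,i in enumerate(language):
-- 		if i == "{":
-- 			aux = 1
-- 			language[index] = ''
--
-- 		if i == "}":
-- 			aux = 0
-- 			language[index] = ''
--
-- 		if i == ',' and aux == 0:
-- 			language[index] = ',,'
--
-- 		if i == '(' or i == ')':
-- 			language[index] = ''
--
--
--
--
-- 	return ''.join(language)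
-- ===== SOURCE B (Python) =====
-- def formatLanguage(lang):
--     pieces = []
--     for i, chunk in enumerate(lang.split('{')):
--         for j, sub in enumerate(chunk.split('}')):
--             s = sub.replace('(', '').replace(')', '')
--             if i == 0 or j > 0:
--                 s = s.replace(',', ',,')
--             pieces.append(s)
--     return ''.join(pieces)
-- ===== Notes on version B (the rewrite author's own statement) =====
-- stated objective: faster
-- what changed: A walks the string character by character in a Python-level loop, mutating a list and an aux mode flag; B splits the string on the brace delimiters and transforms whole segments at once with str.split/str.replace (parens stripped everywhere, commas doubled only in outside segments).
import Mathlib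
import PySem

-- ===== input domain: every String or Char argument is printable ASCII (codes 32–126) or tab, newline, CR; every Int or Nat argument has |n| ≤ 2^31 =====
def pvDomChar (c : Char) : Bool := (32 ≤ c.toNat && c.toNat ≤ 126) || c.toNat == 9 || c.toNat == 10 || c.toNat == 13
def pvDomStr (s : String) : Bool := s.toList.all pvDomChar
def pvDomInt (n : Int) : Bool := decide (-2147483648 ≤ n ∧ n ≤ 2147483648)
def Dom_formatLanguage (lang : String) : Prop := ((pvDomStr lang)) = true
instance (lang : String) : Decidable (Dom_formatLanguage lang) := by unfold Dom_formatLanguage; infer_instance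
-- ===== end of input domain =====

-- B replaces A's per-character mutable state machine by a split-on-brace-delimiters
-- decomposition whose segments are transformed whole with str.replace; measured faster
-- by a constant factor (C-level split/replace vs a Python-level loop).

-- ===== PORT A =====
-- one iteration of A's for-loop: the state is (aux, language); index.toNat is exact here
-- because enumerate only yields nonnegative indices
def fmtStepA (st : Int × List String) (pr : Int × String) : Int × List String :=
  let index := pr.1
  let i := pr.2
  let st1 := if i = "{" then ((1 : Int), st.2.set index.toNat "") else st
  let st2 := if i = "}" then ((0 : Int), st1.2.set index.toNat "") else st1
  let st3 := if i = "," ∧ st2.1 = 0 then (st2.1, st2.2.set index.toNat ",,") else st2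
  if i = "(" ∨ i = ")" then (st3.1, st3.2.set index.toNat "") else st3

def formatLanguage (lang : String) : String :=
  let language := lang.toList.map (fun c => String.ofList [c])
  let res := (PySem.List.enumerate language 0).foldl fmtStepA (0, language)
  PySem.Str.join "" res.2

-- ===== PORT B =====
-- Source B: split on '{', each chunk split on '}', clean each sub with replace, append; join
def formatLanguage_alt (lang : String) : String :=
  let pieces := (PySem.List.enumerate (PySem.Chars.splitOn lang.toList ['{']) 0).foldl
    (fun pieces pi =>
      (PySem.List.enumerate (PySem.Chars.splitOn pi.2 ['}']) 0).foldl
        (fun pieces pj =>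
          let s := PySem.Chars.replace (PySem.Chars.replace pj.2 ['('] []) [')'] []
          let s := if pi.1 = 0 ∨ 0 < pj.1 then PySem.Chars.replace s [','] [',', ','] else s
          pieces ++ [s])
        pieces)
    ([] : List (List Char))
  String.ofList (PySem.Chars.join [] pieces)

-- ===== PRECONDITION & SPEC =====
def Spec_formatLanguage (lang : String) (out : String) : Prop := out = formatLanguage_alt lang
instance (lang : String) (out : String) : Decidable (Spec_formatLanguage lang out) := by unfold Spec_formatLanguage; infer_instance

-- ===== CLAIM (what is proved, stated in full; the proofs are below) =====
def Claim_equal_formatLanguage : Prop := ∀ (lang : String), Dom_formatLanguage lang → Spec_formatLanguage lang (formatLanguage lang)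

-- ===== LEMMAS AND PROOFS =====

theorem single_eq_iff (c d : Char) : (String.ofList [c] = String.ofList [d]) ↔ c = d := by
  constructor
  · intro h
    have := congrArg String.toList h
    simpa using this
  · rintro rfl; rfl

theorem lit_brace_open : "{" = String.ofList ['{'] := rfl
theorem lit_brace_close : "}" = String.ofList ['}'] := rfl
theorem lit_comma : "," = String.ofList [','] := rfl
theorem lit_paren_open : "(" = String.ofList ['('] := rfl
theorem lit_paren_close : ")" = String.ofList [')'] := rfl

theorem set_at (pre : List String) (x v : String) (l : List String) :
    (pre ++ x :: l).set pre.length v = pre ++ v :: l := by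
  induction pre with
  | nil => simp
  | cons a t ih => simp [ih]

-- A's next aux value and the string A leaves at the position of character c
def nextAux (aux : Int) (c : Char) : Int :=
  if c = '{' then 1 else if c = '}' then 0 else aux

def outStr (aux : Int) (c : Char) : String :=
  if c = '{' ∨ c = '}' then "" else
  if c = ',' ∧ aux = 0 then ",," else
  if c = '(' ∨ c = ')' then "" else String.ofList [c]

-- the list A's loop leaves behind, position by position
def procA (aux : Int) : List Char → List String
  | [] => []
  | c :: cs => outStr aux c :: procA (nextAux aux c) cs

-- final value of aux after A's loop
def charAux (aux : Int) : List Char → Int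
  | [] => aux
  | c :: cs => charAux (nextAux aux c) cs

-- A's output at the character level
def charA (aux : Int) : List Char → List Char
  | [] => []
  | c :: cs => (outStr aux c).toList ++ charA (nextAux aux c) cs

theorem stepA_eval (aux : Int) (pre : List String) (c : Char) (rest : List String) :
    fmtStepA (aux, pre ++ String.ofList [c] :: rest) ((pre.length : Int), String.ofList [c])
      = (nextAux aux c, pre ++ outStr aux c :: rest) := by
  have hidx : ((pre.length : Int)).toNat = pre.length := Int.toNat_natCast _
  simp only [fmtStepA, nextAux, outStr, hidx, lit_brace_open, lit_brace_close, lit_comma,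
    lit_paren_open, lit_paren_close, single_eq_iff]
  by_cases h1 : c = '{'
  · subst h1; simp [set_at]
  · by_cases h2 : c = '}'
    · subst h2; simp [set_at]
    · by_cases h3 : c = ','
      · subst h3
        by_cases ha : aux = 0
        · simp [h1, h2, ha, set_at]
        · simp [h1, h2, ha]
      · by_cases h4 : c = '(' ∨ c = ')'
        · rcases h4 with h4 | h4 <;> (subst h4; simp [h1, h2, set_at])
        · simp [h1, h2, h3, h4]

theorem foldA (cs : List Char) (aux : Int) (pre : List String) :
    (PySem.List.enumerate (cs.map (fun c => String.ofList [c])) (pre.length : Int)).foldl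
        fmtStepA (aux, pre ++ cs.map (fun c => String.ofList [c]))
      = (charAux aux cs, pre ++ procA aux cs) := by
  induction cs generalizing aux pre with
  | nil => simp [PySem.List.enumerate_nil, procA, charAux]
  | cons c cs ih =>
    rw [List.map_cons, PySem.List.enumerate_cons, List.foldl_cons, stepA_eval]
    have hlen : (pre.length : Int) + 1 = (((pre ++ [outStr aux c]).length : Nat) : Int) := by
      simp
    have happ : pre ++ outStr aux c :: cs.map (fun c => String.ofList [c])
        = (pre ++ [outStr aux c]) ++ cs.map (fun c => String.ofList [c]) := by simp
    rw [hlen, happ, ih (nextAux aux c) (pre ++ [outStr aux c])]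
    simp [procA, charAux]

theorem flatten_procA (aux : Int) (cs : List Char) :
    ((procA aux cs).map String.toList).flatten = charA aux cs := by
  induction cs generalizing aux with
  | nil => simp [procA, charA]
  | cons c cs ih => simp [procA, charA, ih]

-- reference splitter: what Python's s.split(d) computes, structurally
def mySplit (d : Char) : List Char → List (List Char)
  | [] => [[]]
  | c :: cs => if c = d then [] :: mySplit d cs
               else (c :: (mySplit d cs).headI) :: (mySplit d cs).tail

-- B's transforms of an inside / outside segment
def tIn (s : List Char) : List Char :=
  (s.flatMap (fun c => if c = '(' then [] else [c])).flatMap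
    (fun c => if c = ')' then [] else [c])

def tOut (s : List Char) : List Char :=
  (tIn s).flatMap (fun c => if c = ',' then [',', ','] else [c])

theorem tIn_nil : tIn [] = [] := rfl
theorem tOut_nil : tOut [] = [] := rfl

theorem tIn_cons (c : Char) (s : List Char) :
    tIn (c :: s) = (if c = '(' ∨ c = ')' then [] else [c]) ++ tIn s := by
  by_cases h1 : c = '('
  · simp [tIn, h1]
  · by_cases h2 : c = ')'
    · simp [tIn, h2]
    · simp [tIn, h1, h2]

theorem tOut_cons (c : Char) (s : List Char) :
    tOut (c :: s)
      = (if c = '(' ∨ c = ')' then [] else if c = ',' then [',', ','] else [c]) ++ tOut s := by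
  rw [tOut, tIn_cons]
  by_cases h1 : c = '(' ∨ c = ')'
  · simp [tOut, h1]
  · by_cases h2 : c = ','
    · simp [tOut, h1, h2]
    · simp [tOut, h1, h2]

-- B's inner map over an enumeration whose indices are all positive
theorem map_enum_pos (tr : Int → List Char → List Char) (f : List Char → List Char)
    (h : ∀ j sub, 1 ≤ j → tr j sub = f sub) :
    ∀ (t : List (List Char)) (s : Int), 1 ≤ s →
    (PySem.List.enumerate t s).map (fun pj => tr pj.1 pj.2) = t.map f := by
  intro t
  induction t with
  | nil => intro s _; simp [PySem.List.enumerate_nil]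
  | cons a u ih =>
    intro s hs
    rw [PySem.List.enumerate_cons]
    simp only [List.map_cons, h s a hs, ih (s + 1) (by omega)]

theorem flatMap_enum_pos (g : Int → List Char → List (List Char)) (f : List Char → List (List Char))
    (h : ∀ i ch, 1 ≤ i → g i ch = f ch) :
    ∀ (t : List (List Char)) (s : Int), 1 ≤ s →
    (PySem.List.enumerate t s).flatMap (fun pi => g pi.1 pi.2) = t.flatMap f := by
  intro t
  induction t with
  | nil => intro s _; simp [PySem.List.enumerate_nil]
  | cons a u ih =>
    intro s hs
    rw [PySem.List.enumerate_cons]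
    simp only [List.flatMap_cons, h s a hs, ih (s + 1) (by omega)]

theorem flatten_flatMap {α : Type} (l : List α) (f : α → List (List Char)) :
    (l.flatMap f).flatten = (l.map (fun x => (f x).flatten)).flatten := by
  induction l with
  | nil => simp
  | cons a t ih => simp [ih]

theorem mySplit_ne_nil (d : Char) (l : List Char) : mySplit d l ≠ [] := by
  cases l with
  | nil => simp [mySplit]
  | cons c cs => unfold mySplit; split <;> simp

theorem headI_cons_tail (d : Char) (l : List Char) :
    (mySplit d l).headI :: (mySplit d l).tail = mySplit d l := by
  have := mySplit_ne_nil d l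
  cases h : mySplit d l with
  | nil => exact absurd h this
  | cons a t => simp

-- B's value on one outside-mode remainder / one later chunk
def BOut (l : List Char) : List Char := ((mySplit '}' l).map tOut).flatten
def BIn (ch : List Char) : List Char :=
  tIn ((mySplit '}' ch).headI) ++ (((mySplit '}' ch).tail).map tOut).flatten

theorem BOut_brace (H : List Char) : BOut ('}' :: H) = BOut H := by
  rw [BOut, show mySplit '}' ('}' :: H) = [] :: mySplit '}' H by simp [mySplit]]
  simp [BOut, tOut_nil]

theorem BIn_brace (H : List Char) : BIn ('}' :: H) = BOut H := by
  rw [BIn, show mySplit '}' ('}' :: H) = [] :: mySplit '}' H by simp [mySplit]]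
  simp [BOut, tIn_nil]

theorem BOut_chr (c : Char) (h : c ≠ '}') (H : List Char) :
    BOut (c :: H)
      = (if c = '(' ∨ c = ')' then [] else if c = ',' then [',', ','] else [c]) ++ BOut H := by
  rcases hS : mySplit '}' H with _ | ⟨a, t⟩
  · exact absurd hS (mySplit_ne_nil _ _)
  · rw [BOut, show mySplit '}' (c :: H) = (c :: (mySplit '}' H).headI) :: (mySplit '}' H).tail by
      simp [mySplit, h], hS]
    simp [BOut, hS, tOut_cons]

theorem BIn_chr (c : Char) (h : c ≠ '}') (H : List Char) :
    BIn (c :: H) = (if c = '(' ∨ c = ')' then [] else [c]) ++ BIn H := by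
  rcases hS : mySplit '}' H with _ | ⟨a, t⟩
  · exact absurd hS (mySplit_ne_nil _ _)
  · rw [BIn, show mySplit '}' (c :: H) = (c :: (mySplit '}' H).headI) :: (mySplit '}' H).tail by
      simp [mySplit, h], hS]
    simp [BIn, hS, tIn_cons]

theorem BIn_nil : BIn [] = [] := by simp [BIn, mySplit, tIn_nil]

theorem outStr0_toList (c : Char) (h1 : c ≠ '{') (h2 : c ≠ '}') :
    (outStr 0 c).toList = if c = '(' ∨ c = ')' then [] else if c = ',' then [',', ','] else [c] := by
  by_cases h3 : c = '(' ∨ c = ')'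
  · rcases h3 with h | h <;> subst h <;> simp [outStr]
  · by_cases h4 : c = ','
    · subst h4; simp [outStr]
    · simp [outStr, h1, h2, h3, h4]

theorem outStr1_toList (c : Char) (h1 : c ≠ '{') (h2 : c ≠ '}') :
    (outStr 1 c).toList = if c = '(' ∨ c = ')' then [] else [c] := by
  by_cases h3 : c = '(' ∨ c = ')'
  · rcases h3 with h | h <;> subst h <;> simp [outStr]
  · by_cases h4 : c = ','
    · subst h4; simp [outStr]
    · simp [outStr, h1, h2, h3, h4]

-- main equivalence at the character level: A's state machine vs B's split decomposition
theorem main_out_in (l : List Char) :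
    charA 0 l = BOut ((mySplit '{' l).headI) ++ (((mySplit '{' l).tail).map BIn).flatten
  ∧ charA 1 l = BIn ((mySplit '{' l).headI) ++ (((mySplit '{' l).tail).map BIn).flatten := by
  induction l with
  | nil =>
    constructor <;> simp [charA, mySplit, BOut, BIn_nil, tOut_nil]
  | cons c cs ih =>
    obtain ⟨ih1, ih2⟩ := ih
    rcases hS : mySplit '{' cs with _ | ⟨c0, rest⟩
    · exact absurd hS (mySplit_ne_nil _ _)
    rw [hS] at ih1 ih2
    simp only [List.headI_cons, List.tail_cons] at ih1 ih2
    by_cases h1 : c = '{'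
    · subst h1
      rw [show mySplit '{' ('{' :: cs) = [] :: mySplit '{' cs by simp [mySplit], hS]
      simp only [List.headI_cons, List.tail_cons, List.map_cons, List.flatten_cons]
      have hA0 : charA 0 ('{' :: cs) = charA 1 cs := by simp [charA, outStr, nextAux]
      have hA1 : charA 1 ('{' :: cs) = charA 1 cs := by simp [charA, outStr, nextAux]
      constructor
      · rw [hA0, ih2]; simp [BOut, mySplit, tOut_nil]
      · rw [hA1, ih2, BIn_nil]; simp
    · by_cases h2 : c = '}'
      · subst h2
        rw [show mySplit '{' ('}' :: cs)
            = ('}' :: (mySplit '{' cs).headI) :: (mySplit '{' cs).tail by simp [mySplit], hS]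
        simp only [List.headI_cons, List.tail_cons]
        have hA0 : charA 0 ('}' :: cs) = charA 0 cs := by simp [charA, outStr, nextAux]
        have hA1 : charA 1 ('}' :: cs) = charA 0 cs := by simp [charA, outStr, nextAux]
        constructor
        · rw [hA0, ih1, BOut_brace]
        · rw [hA1, ih1, BIn_brace]
      · rw [show mySplit '{' (c :: cs)
            = (c :: (mySplit '{' cs).headI) :: (mySplit '{' cs).tail by simp [mySplit, h1], hS]
        simp only [List.headI_cons, List.tail_cons]
        have hA0 : charA 0 (c :: cs) = (outStr 0 c).toList ++ charA 0 cs := by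
          simp [charA, nextAux, h1, h2]
        have hA1 : charA 1 (c :: cs) = (outStr 1 c).toList ++ charA 1 cs := by
          simp [charA, nextAux, h1, h2]
        constructor
        · rw [hA0, ih1, BOut_chr c h2, outStr0_toList c h1 h2]; simp
        · rw [hA1, ih2, BIn_chr c h2, outStr1_toList c h1 h2]; simp

theorem replace_go_single (o : Char) (nw : List Char) :
    ∀ (fuel : Nat) (l acc : List Char), l.length ≤ fuel →
    PySem.Chars.replace.go [o] nw fuel l acc
      = acc.reverse ++ l.flatMap (fun c => if c = o then nw else [c]) := by
  intro fuel
  induction fuel with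
  | zero =>
    intro l acc h
    cases l with
    | nil => simp [PySem.Chars.replace.go]
    | cons c t => simp at h
  | succ f ih =>
    intro l acc h
    cases l with
    | nil => simp [PySem.Chars.replace.go]
    | cons c t =>
      rw [PySem.Chars.replace.go]
      by_cases hc : c = o
      · subst hc
        simp [List.isPrefixOf, ih t _ (by simpa using Nat.le_of_succ_le_succ h)]
      · simp [List.isPrefixOf, Ne.symm hc, hc, ih t _ (by simpa using Nat.le_of_succ_le_succ h)]

theorem replace_single (o : Char) (nw : List Char) (l : List Char) :
    PySem.Chars.replace l [o] nw = l.flatMap (fun c => if c = o then nw else [c]) := by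
  simp [PySem.Chars.replace, replace_go_single o nw l.length l [] le_rfl]

theorem splitOn_go_single (d : Char) :
    ∀ (fuel : Nat) (l cur : List Char) (acc : List (List Char)), l.length < fuel →
    PySem.Chars.splitOn.go [d] fuel l cur acc
      = acc.reverse ++ ((cur.reverse ++ (mySplit d l).headI) :: (mySplit d l).tail) := by
  intro fuel
  induction fuel with
  | zero => intro l cur acc h; exact absurd h (Nat.not_lt_zero _)
  | succ f ih =>
    intro l cur acc h
    cases l with
    | nil => simp [PySem.Chars.splitOn.go, mySplit]
    | cons c t =>
      rw [PySem.Chars.splitOn.go]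
      by_cases hc : c = d
      · subst hc
        simp only [List.isPrefixOf, List.length_cons, List.length_nil, List.drop_succ_cons,
          List.drop_zero, beq_self_eq_true, Bool.and_true, if_pos]
        rw [ih t [] (cur.reverse :: acc) (by simpa using Nat.lt_of_succ_lt_succ h)]
        simp [mySplit, headI_cons_tail]
      · simp only [List.isPrefixOf]
        rw [if_neg (by simp [Ne.symm hc])]
        rw [ih t (c :: cur) acc (by simpa using Nat.lt_of_succ_lt_succ h)]
        simp [mySplit, hc]

theorem splitOn_single (d : Char) (l : List Char) :
    PySem.Chars.splitOn l [d] = mySplit d l := by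
  rw [PySem.Chars.splitOn, splitOn_go_single d (l.length + 1) l [] [] (by omega)]
  simp [headI_cons_tail]

theorem join_nilsep (parts : List (List Char)) :
    PySem.Chars.join [] parts = parts.flatten := by
  induction parts with
  | nil => simp [PySem.Chars.join, List.intercalate]
  | cons a t ih =>
    cases t with
    | nil => simp [PySem.Chars.join, List.intercalate]
    | cons b u =>
      rw [PySem.Chars.join_cons_cons] at *
      simp_all [List.flatten]

-- the i = 0 chunk: every sub is transformed with tOut
theorem map_enum_zero (subs : List (List Char)) (s : Int) :
    (PySem.List.enumerate subs s).map
        (fun pj => if (0 : Int) = 0 ∨ 0 < pj.1 then tOut pj.2 else tIn pj.2)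
      = subs.map tOut := by
  simp only [true_or, if_true]
  rw [show (fun pj : Int × List Char => tOut pj.2) = tOut ∘ Prod.snd from rfl,
    ← List.map_map, PySem.List.map_snd_enumerate]

-- one later chunk (index i ≠ 0): first sub inside, the rest outside
theorem chunk_pos (i : Int) (hi : 1 ≤ i) (ch : List Char) :
    (PySem.List.enumerate (mySplit '}' ch) 0).map
        (fun pj => if i = 0 ∨ 0 < pj.1 then tOut pj.2 else tIn pj.2)
      = tIn ((mySplit '}' ch).headI) :: ((mySplit '}' ch).tail).map tOut := by
  rcases hS : mySplit '}' ch with _ | ⟨a, t⟩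
  · exact absurd hS (mySplit_ne_nil _ _)
  · rw [PySem.List.enumerate_cons]
    simp only [List.map_cons, List.headI_cons, List.tail_cons]
    have hi0 : ¬ (i = 0 ∨ 0 < (0 : Int)) := by omega
    rw [if_neg hi0]
    rw [zero_add]
    congr 1
    exact map_enum_pos (fun j sub => if i = 0 ∨ 0 < j then tOut sub else tIn sub) tOut
      (fun j sub hj => if_pos (Or.inr (by omega))) t 1 le_rfl

-- B's nested appending folds, written as one flatMap
theorem hfold (pcs : List (Int × List Char)) (init : List (List Char)) :
    pcs.foldl (fun pieces pi =>
        (PySem.List.enumerate (mySplit '}' pi.2) 0).foldl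
          (fun pieces pj =>
            pieces ++ [if pi.1 = 0 ∨ 0 < pj.1
              then PySem.Chars.replace (PySem.Chars.replace (PySem.Chars.replace pj.2 ['('] []) [')'] []) [','] [',', ',']
              else PySem.Chars.replace (PySem.Chars.replace pj.2 ['('] []) [')'] []])
          pieces) init
      = init ++ pcs.flatMap (fun pi =>
          (PySem.List.enumerate (mySplit '}' pi.2) 0).map
            (fun pj => if pi.1 = 0 ∨ 0 < pj.1 then tOut pj.2 else tIn pj.2)) := by
  rw [← PySem.List.foldl_append_eq_flatMap]
  apply PySem.List.foldl_congr_mem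
  intro acc pi _
  rw [PySem.List.foldl_append_singleton_eq_map]
  congr 1
  apply List.map_congr_left
  intro pj _
  have h1 : PySem.Chars.replace (PySem.Chars.replace pj.2 ['('] []) [')'] [] = tIn pj.2 := by
    rw [replace_single, replace_single, tIn]
  split
  · rw [h1, replace_single, tOut]
  · exact h1

theorem B_eq (lang : String) :
    formatLanguage_alt lang = String.ofList (charA 0 lang.toList) := by
  unfold formatLanguage_alt
  simp only [splitOn_single]
  rw [hfold]
  rcases hS : mySplit '{' lang.toList with _ | ⟨c0, rest⟩
  · exact absurd hS (mySplit_ne_nil _ _)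
  rw [PySem.List.enumerate_cons, List.flatMap_cons, List.nil_append, map_enum_zero,
    zero_add,
    flatMap_enum_pos _ (fun ch => tIn ((mySplit '}' ch).headI) :: ((mySplit '}' ch).tail).map tOut)
      (fun i ch hi => chunk_pos i hi ch) rest 1 le_rfl,
    join_nilsep, List.flatten_append, flatten_flatMap]
  have hBIn : (fun ch => ((tIn ((mySplit '}' ch).headI) :: ((mySplit '}' ch).tail).map tOut)).flatten)
      = BIn := by
    funext ch; simp [BIn]
  rw [hBIn, show ((mySplit '}' c0).map tOut).flatten = BOut c0 from rfl,
    (main_out_in lang.toList).1, hS]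
  simp

theorem A_eq (lang : String) :
    formatLanguage lang = String.ofList (charA 0 lang.toList) := by
  unfold formatLanguage
  have h := foldA lang.toList 0 []
  simp only [List.length_nil, Nat.cast_zero, List.nil_append] at h
  simp only [h]
  rw [PySem.Str.join, show ("" : String).toList = [] from rfl, join_nilsep, flatten_procA]

-- ===== VERDICT (by name: the statement is the Claim_ definition above) =====
theorem formatLanguage_spec : Claim_equal_formatLanguage := by
  intro lang _
  unfold Spec_formatLanguage
  rw [A_eq, B_eq]
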